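-- pv_equiv track=rewrite | github.com/Guillaume-gillard/LEPL1401 | Examen Janvier 2023/Q1.py | multiplications
-- ===== SOURCE A (Python) =====
-- def multiplications(n):
--     """
--     pre:  n est un nombre entier positif
--     post: Retourne le nombre de décompositions a,b distinctes
--           telles que n == a*b == b*a
--     """
--     count = 0
--     for i in range(1, n+1):
--         if n % i == 0 :
--             for j in range(1, n+1):
--                 if n % j == 0 and i*j == n :
--                     if i == j :
--                         count += 1
--                     count += 1
--     return count//2
-- ===== SOURCE B (Python) =====
-- def multiplications(n):
--     # Count divisors i of n with i*i <= n: each corresponds to exactly one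
--     # unordered decomposition n == i * (n // i), which is what A counts.
--     count = 0
--     i = 1
--     while i * i <= n:
--         if n % i == 0:
--             count += 1
--         i += 1
--     return count
-- ===== Notes on version B (the rewrite author's own statement) =====
-- stated objective: faster
-- what changed: Replaced the O(n^2) double scan over all of range(1,n+1) by a single loop over i with i*i <= n that counts divisors up to sqrt(n), which equals the number of unordered decompositions directly (divisor pairing i <-> n//i).
import Mathlib
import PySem

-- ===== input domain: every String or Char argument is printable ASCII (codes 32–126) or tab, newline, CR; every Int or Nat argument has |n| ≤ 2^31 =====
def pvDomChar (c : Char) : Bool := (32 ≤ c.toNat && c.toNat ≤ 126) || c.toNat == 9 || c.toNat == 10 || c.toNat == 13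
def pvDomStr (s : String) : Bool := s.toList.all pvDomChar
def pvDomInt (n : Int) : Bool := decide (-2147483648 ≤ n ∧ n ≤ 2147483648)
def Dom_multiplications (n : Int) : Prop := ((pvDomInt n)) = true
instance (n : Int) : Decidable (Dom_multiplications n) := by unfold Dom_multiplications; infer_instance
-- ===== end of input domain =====

-- B replaces A's O(n^2) double scan by one loop over i with i*i ≤ n counting divisors up to sqrt(n).

-- ===== PORT A =====
def multiplications (n : Int) : Int :=
  let count := (PySem.List.pyRange 1 (n+1) 1).foldl (fun count i =>
    if PySem.Int.mod n i = 0 then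
      (PySem.List.pyRange 1 (n+1) 1).foldl (fun count j =>
        if PySem.Int.mod n j = 0 ∧ i * j = n then
          if i = j then (count + 1) + 1 else count + 1
        else count) count
    else count) 0
  PySem.Int.floordiv count 2

-- ===== PORT B =====
-- the 'while i*i <= n' loop of Source B
def multAltLoop (n i count : Int) : Int :=
  if _h : i * i ≤ n then
    multAltLoop n (i + 1) (if PySem.Int.mod n i = 0 then count + 1 else count)
  else count
termination_by (n + 1 - i).toNat
decreasing_by
  have hi : i ≤ n := by
    by_cases h0 : i ≤ 0
    · nlinarith [mul_self_nonneg i]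
    · nlinarith
  omega

def multiplications_alt (n : Int) : Int := multAltLoop n 1 0

-- ===== PRECONDITION & SPEC =====
def Spec_multiplications (n : Int) (out : Int) : Prop := out = multiplications_alt n
instance (n : Int) (out : Int) : Decidable (Spec_multiplications n out) := by unfold Spec_multiplications; infer_instance

-- ===== CLAIM (what is proved, stated in full; the proofs are below) =====
def Claim_equal_multiplications : Prop := ∀ (n : Int), Dom_multiplications n → Spec_multiplications n (multiplications n)

-- ===== LEMMAS AND PROOFS =====

-- the per-i contribution of A's loops
def contribA (n i : Int) : Int :=
  if n % i = 0 then (if i * i = n then 2 else 1) else 0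

-- divisors of n counted with B's bound
noncomputable def sqrtDivs (n : Int) : Finset Int :=
  (Finset.Icc 1 n).filter (fun j => n % j = 0 ∧ j * j ≤ n)

-- A's inner loop picks out exactly j = n / i
lemma innerA (n i : Int) (hn : 1 ≤ n) (hi1 : 1 ≤ i) (hdvd : i ∣ n) (c : Int) :
    (PySem.List.pyRange 1 (n+1) 1).foldl (fun count j =>
        if PySem.Int.mod n j = 0 ∧ i * j = n then
          if i = j then (count + 1) + 1 else count + 1
        else count) c = c + (if i * i = n then 2 else 1) := by
  have hij : i * (n / i) = n := Int.mul_ediv_cancel' hdvd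
  set j0 := n / i with hj0
  have hj1 : 1 ≤ j0 := by nlinarith
  have hjn : j0 ≤ n := by nlinarith
  have foldZ : ∀ (l : List Int) (acc : Int), (∀ j ∈ l, ¬(PySem.Int.mod n j = 0 ∧ i * j = n)) →
      l.foldl (fun count j =>
        if PySem.Int.mod n j = 0 ∧ i * j = n then
          if i = j then (count + 1) + 1 else count + 1
        else count) acc = acc := by
    intro l
    induction l with
    | nil => intro acc _; rfl
    | cons x xs ih =>
      intro acc h
      rw [List.foldl_cons, if_neg (h x List.mem_cons_self)]
      exact ih acc (fun j hj => h j (List.mem_cons_of_mem x hj))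
  rw [PySem.List.pyRange_one_append 1 j0 (n+1) (by omega) (by omega),
      PySem.List.pyRange_one_cons (show j0 < n + 1 by omega),
      List.foldl_append]
  rw [foldZ _ c (by
    intro j hj
    rw [PySem.List.mem_pyRange_one] at hj
    rintro ⟨-, hij'⟩
    nlinarith [hj.1, hj.2])]
  rw [List.foldl_cons,
      if_pos ⟨(PySem.Int.mod_eq_zero_iff_dvd n j0).mpr ⟨i, by linarith [mul_comm i j0, hij]⟩, hij⟩]
  rw [foldZ _ _ (by
    intro j hj
    rw [PySem.List.mem_pyRange_one] at hj
    rintro ⟨-, hij'⟩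
    nlinarith [hj.1, hj.2])]
  by_cases hii : i * i = n
  · have he : i = j0 := mul_left_cancel₀ (show i ≠ 0 by omega) (by rw [hii, hij])
    rw [if_pos he, if_pos hii]
    ring
  · have he : i ≠ j0 := fun he => hii (he ▸ hij)
    rw [if_neg he, if_neg hii]

-- A's value as a floordiv of a Finset sum
lemma multA_sum (n : Int) (hn : 1 ≤ n) :
    multiplications n = PySem.Int.floordiv (∑ i ∈ Finset.Icc 1 n, contribA n i) 2 := by
  show PySem.Int.floordiv ((PySem.List.pyRange 1 (n+1) 1).foldl _ 0) 2 = _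
  rw [PySem.List.foldl_congr_mem _ _ (fun count i => count + contribA n i) _ (by
    intro acc x hx
    rw [PySem.List.mem_pyRange_one] at hx
    have hmod : PySem.Int.mod n x = n % x := PySem.Int.mod_eq_emod_of_pos (by omega)
    by_cases hm : n % x = 0
    · rw [if_pos (show PySem.Int.mod n x = 0 by rw [hmod]; exact hm)]
      rw [innerA n x hn hx.1 (Int.dvd_of_emod_eq_zero hm) acc]
      simp [contribA, hm]
    · rw [if_neg (show ¬ PySem.Int.mod n x = 0 by rw [hmod]; exact hm)]
      simp [contribA, hm])]
  rw [PySem.List.foldl_add]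
  have ht : (PySem.List.pyRange 1 (n+1) 1).toFinset = Finset.Icc 1 n := by
    ext x
    simp only [List.mem_toFinset, PySem.List.mem_pyRange_one, Finset.mem_Icc]
    omega
  rw [← ht, List.sum_toFinset _ (PySem.List.nodup_pyRange_one 1 (n+1))]
  norm_num

-- pairing i ↦ n / i between small and large divisors
lemma card_small_eq_card_large (n : Int) (hn : 1 ≤ n) :
    (((Finset.Icc 1 n).filter (fun i => n % i = 0)).filter (fun i => i * i < n)).card =
    (((Finset.Icc 1 n).filter (fun i => n % i = 0)).filter (fun i => n < i * i)).card := by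
  apply Finset.card_bij' (fun a _ => n / a) (fun b _ => n / b)
  · intro a ha
    simp only [Finset.mem_filter, Finset.mem_Icc] at ha ⊢
    obtain ⟨⟨⟨ha1, han⟩, hm⟩, hlt⟩ := ha
    have hq : a * (n / a) = n := Int.mul_ediv_cancel' (Int.dvd_of_emod_eq_zero hm)
    have h1 : 1 ≤ n / a := by nlinarith
    have hal : a < n / a := by nlinarith
    refine ⟨⟨⟨h1, by nlinarith⟩, Int.emod_eq_zero_of_dvd ⟨a, by linarith [mul_comm a (n / a), hq]⟩⟩, by nlinarith⟩
  · intro b hb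
    simp only [Finset.mem_filter, Finset.mem_Icc] at hb ⊢
    obtain ⟨⟨⟨hb1, hbn⟩, hm⟩, hgt⟩ := hb
    have hq : b * (n / b) = n := Int.mul_ediv_cancel' (Int.dvd_of_emod_eq_zero hm)
    have h1 : 1 ≤ n / b := by nlinarith
    have hbl : n / b < b := by nlinarith
    refine ⟨⟨⟨h1, by nlinarith⟩, Int.emod_eq_zero_of_dvd ⟨b, by linarith [mul_comm b (n / b), hq]⟩⟩, by nlinarith⟩
  · intro a ha
    simp only [Finset.mem_filter, Finset.mem_Icc] at ha
    obtain ⟨⟨⟨ha1, han⟩, hm⟩, hlt⟩ := ha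
    have hq : a * (n / a) = n := Int.mul_ediv_cancel' (Int.dvd_of_emod_eq_zero hm)
    have h1 : 1 ≤ n / a := by nlinarith
    exact Int.ediv_eq_of_eq_mul_left (by omega) hq.symm
  · intro b hb
    simp only [Finset.mem_filter, Finset.mem_Icc] at hb
    obtain ⟨⟨⟨hb1, hbn⟩, hm⟩, hgt⟩ := hb
    have hq : b * (n / b) = n := Int.mul_ediv_cancel' (Int.dvd_of_emod_eq_zero hm)
    have h1 : 1 ≤ n / b := by nlinarith
    exact Int.ediv_eq_of_eq_mul_left (by omega) hq.symm

-- the sum A computes is twice B's count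
lemma sum_eq_two_mul (n : Int) (hn : 1 ≤ n) :
    (∑ i ∈ Finset.Icc 1 n, contribA n i) = 2 * (sqrtDivs n).card := by
  have h1 : (∑ i ∈ Finset.Icc 1 n, contribA n i) =
      ∑ i ∈ (Finset.Icc 1 n).filter (fun i => n % i = 0), (if i * i = n then (2:ℤ) else 1) := by
    rw [Finset.sum_filter]
    apply Finset.sum_congr rfl
    intro x _
    rfl
  set D := (Finset.Icc 1 n).filter (fun i => n % i = 0) with hD
  have h2 : (∑ i ∈ D, (if i * i = n then (2:ℤ) else 1)) =
      ↑(D.filter (fun i => i * i = n)).card + ↑D.card := by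
    have : ∀ i ∈ D, (if i * i = n then (2:ℤ) else 1) = (if i * i = n then (1:ℤ) else 0) + 1 := by
      intro i _; split_ifs <;> ring
    rw [Finset.sum_congr rfl this, Finset.sum_add_distrib, Finset.sum_boole, Finset.sum_const]
    simp
  have e1 : (D.filter (fun i => i * i ≤ n)).filter (fun i => i * i = n)
      = D.filter (fun i => i * i = n) := by
    ext x
    simp only [Finset.mem_filter]
    constructor
    · rintro ⟨⟨a, -⟩, c⟩; exact ⟨a, c⟩
    · rintro ⟨a, c⟩; exact ⟨⟨a, le_of_eq c⟩, c⟩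
  have e2 : (D.filter (fun i => i * i ≤ n)).filter (fun i => ¬ i * i = n)
      = D.filter (fun i => i * i < n) := by
    ext x
    simp only [Finset.mem_filter]
    constructor
    · rintro ⟨⟨a, b⟩, c⟩; exact ⟨a, lt_of_le_of_ne b c⟩
    · rintro ⟨a, b⟩; exact ⟨⟨a, le_of_lt b⟩, ne_of_lt b⟩
  have e3 : D.filter (fun i => ¬ i * i ≤ n) = D.filter (fun i => n < i * i) := by
    ext x
    simp only [Finset.mem_filter, not_le]
  have e4 : sqrtDivs n = D.filter (fun i => i * i ≤ n) := by
    unfold sqrtDivs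
    rw [hD, Finset.filter_filter]
  have hsplitD := Finset.card_filter_add_card_filter_not
    (s := D) (p := fun i => i * i ≤ n)
  have hsplitL := Finset.card_filter_add_card_filter_not
    (s := D.filter (fun i => i * i ≤ n)) (p := fun i => i * i = n)
  rw [e1, e2] at hsplitL
  rw [e3] at hsplitD
  have hbij := card_small_eq_card_large n hn
  rw [← hD] at hbij
  rw [h1, h2, e4]
  omega

-- B's loop counts sqrt-bounded divisors from i upward
lemma altLoop_count (n : Int) (hn : 1 ≤ n) :
    ∀ i c, 1 ≤ i → multAltLoop n i c =
      c + ((Finset.Icc i n).filter (fun j => n % j = 0 ∧ j * j ≤ n)).card := by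
  have H : ∀ k : ℕ, ∀ i c, 1 ≤ i → (n + 1 - i).toNat ≤ k → multAltLoop n i c =
      c + ((Finset.Icc i n).filter (fun j => n % j = 0 ∧ j * j ≤ n)).card := by
    intro k
    induction k with
    | zero =>
      intro i c hi hk
      have hlt : n < i := by omega
      rw [multAltLoop, dif_neg (by simp only [not_le]; nlinarith),
        Finset.Icc_eq_empty (by omega)]
      simp
    | succ k ih =>
      intro i c hi hk
      rw [multAltLoop]
      by_cases h : i * i ≤ n
      · rw [dif_pos h, PySem.Int.mod_eq_emod_of_pos (by omega : (0:Int) < i)]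
        have hin : i ≤ n := by
          by_cases h0 : i ≤ 0
          · nlinarith [mul_self_nonneg i]
          · nlinarith
        rw [ih (i + 1) _ (by omega) (by omega)]
        have hIcc : Finset.Icc i n = insert i (Finset.Icc (i + 1) n) := by
          ext x; simp only [Finset.mem_Icc, Finset.mem_insert]; omega
        rw [hIcc, Finset.filter_insert]
        by_cases hm : n % i = 0
        · rw [if_pos (show n % i = 0 ∧ i * i ≤ n from ⟨hm, h⟩), Finset.card_insert_of_notMem
            (by simp only [Finset.mem_filter, Finset.mem_Icc]; rintro ⟨⟨h1, -⟩, -⟩; omega)]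
          simp only [if_pos hm]
          push_cast; ring
        · rw [if_neg (show ¬(n % i = 0 ∧ i * i ≤ n) from fun hc => hm hc.1)]
          simp only [if_neg hm]
      · rw [dif_neg h]
        have hemp : (Finset.Icc i n).filter (fun j => n % j = 0 ∧ j * j ≤ n) = ∅ := by
          rw [Finset.filter_eq_empty_iff]
          intro j hj
          simp only [Finset.mem_Icc] at hj
          rw [not_le] at h
          rintro ⟨-, hjj⟩
          nlinarith [mul_le_mul hj.1 hj.1 (by omega : (0:Int) ≤ i) (by omega : (0:Int) ≤ j)]
        rw [hemp]; simp
  intro i c hi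
  exact H _ i c hi le_rfl

-- ===== VERDICT (by name: the statement is the Claim_ definition above) =====
theorem multiplications_spec : Claim_equal_multiplications := by
  intro n _
  unfold Spec_multiplications
  by_cases hn : n ≤ 0
  · have hA : multiplications n = 0 := by
      simp [multiplications, PySem.List.pyRange_one_eq_nil (by omega : n + 1 ≤ 1)]
    have hB : multiplications_alt n = 0 := by
      unfold multiplications_alt
      rw [multAltLoop]
      simp
      omega
    rw [hA, hB]
  · have hn1 : 1 ≤ n := by omega
    rw [multA_sum n hn1, sum_eq_two_mul n hn1]
    unfold multiplications_alt
    rw [altLoop_count n hn1 1 0 le_rfl]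
    rw [PySem.Int.floordiv_eq_ediv_of_pos (by norm_num)]
    rw [Int.mul_ediv_cancel_left _ (by norm_num : (2:Int) ≠ 0)]
    unfold sqrtDivs
    simp
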